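-- pv_equiv track=rewrite | github.com/kakao-harry-kr2/Algorithms | 04-April/20220416/2019_kakao_internship_3.py | solution
-- ===== SOURCE A (Python) =====
-- def process(count, included, idx, answer:set):
--     if idx == len(count):
--         answer.add(''.join(list(map(str, sorted(included)))))
--         return
--
--     ans = 0
--     for id in count[idx]:
--         if id not in included:
--             process(count, included + [id], idx+1, answer)
--
--     return ans
--
-- def solution(user_id, banned_id):
--     count = [[] for _ in range(len(banned_id))]
--
--     for idx1, bid in enumerate(banned_id):
--         for idx2, uid in enumerate(user_id):
--             if len(bid) != len(uid):
--                 continue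
--
--             is_same = True
--             for i in range(len(bid)):
--                 if bid[i] == '*':
--                     continue
--
--                 if bid[i] != uid[i]:
--                     is_same = False
--                     break
--
--             if is_same:
--                 count[idx1].append(idx2)
--
--     answer = set()
--
--     process(count, [], 0, answer)
--
--     return len(list(answer))
-- ===== SOURCE B (Python) =====
-- def solution(user_id, banned_id):
--     def matches(bid, uid):
--         return len(bid) == len(uid) and all(b == '*' or b == u for b, u in zip(bid, uid))
--
--     slots = [[i for i, uid in enumerate(user_id) if matches(bid, uid)] for bid in banned_id]
--
--     combos = [[]]
--     for ids in slots:
--         combos = [c + [i] for c in combos for i in ids]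
--
--     answer = {''.join(map(str, sorted(c))) for c in combos if len(set(c)) == len(c)}
--     return len(answer)
-- ===== Notes on version B (the rewrite author's own statement) =====
-- stated objective: alternative
-- what changed: B replaces A's recursive backtracking enumeration (process, which prunes repeated ids while recursing) with an iteratively built full cross product of the per-pattern candidate lists followed by a distinctness filter, and replaces A's indexed char loop with break by a zip/all match test.
import Mathlib
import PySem

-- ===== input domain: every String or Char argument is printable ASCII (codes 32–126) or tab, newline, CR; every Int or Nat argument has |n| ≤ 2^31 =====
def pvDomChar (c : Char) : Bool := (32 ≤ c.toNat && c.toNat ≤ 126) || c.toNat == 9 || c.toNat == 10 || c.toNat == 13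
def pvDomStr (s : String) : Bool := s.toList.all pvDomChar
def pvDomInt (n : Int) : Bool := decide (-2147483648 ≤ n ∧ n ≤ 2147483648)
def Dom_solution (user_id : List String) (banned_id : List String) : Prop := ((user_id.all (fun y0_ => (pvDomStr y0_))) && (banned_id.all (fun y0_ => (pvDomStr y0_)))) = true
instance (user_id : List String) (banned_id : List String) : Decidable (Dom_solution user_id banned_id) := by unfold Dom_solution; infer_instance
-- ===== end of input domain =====

-- B replaces A's recursive backtracking enumeration with an iteratively built cross product
-- of the candidate lists plus a distinctness filter (alternative decomposition, same cost class).

-- ===== PORT A =====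
-- A's inner char loop 'for i in range(len(bid))' with continue/break, stepped over the two
-- char lists in parallel (exact: the loop reads bid[i] and uid[i] only when i < len(bid),
-- and it is only reached when len(bid) == len(uid)).
def isSameA : List Char → List Char → Bool
  | [], _ => true
  | _ :: _, [] => true
  | b :: bs, u :: us => if b = '*' then isSameA bs us else if b ≠ u then false else isSameA bs us

-- the nested matching loops filling count; the mutation count[idx1].append(idx2) is ported
-- as pySetD/pyGetD on the list of rows at index idx1
def buildCountA (user_id : List String) (banned_id : List String) : List (List Int) :=
  (PySem.List.enumerate banned_id).foldl
    (fun count p =>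
      (PySem.List.enumerate user_id).foldl
        (fun count q =>
          if PySem.Str.len p.2 ≠ PySem.Str.len q.2 then count
          else if isSameA p.2.toList q.2.toList then
            PySem.List.pySetD count p.1 (PySem.List.pyGetD count p.1 [] ++ [q.1])
          else count)
        count)
    (banned_id.map (fun _ => ([] : List Int)))

-- process(count, included, idx, answer): recursion over the remaining rows count[idx:];
-- the 'for id in count[idx]' loop is the mutual helper processLoopA
mutual
  def processA : List (List Int) → List Int → PySem.Set String → PySem.Set String
    | [], included, answer =>
        PySem.Set.add answer
          (PySem.Str.join "" ((PySem.List.sorted included (fun x => x)).map PySem.Int.toStr))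
    | ids :: rest, included, answer => processLoopA ids rest included answer
    termination_by count _ _ => (count.length, 0)
  def processLoopA : List Int → List (List Int) → List Int → PySem.Set String → PySem.Set String
    | [], _, _, answer => answer
    | id :: ids, rest, included, answer =>
        processLoopA ids rest included
          (if included.contains id then answer else processA rest (included ++ [id]) answer)
    termination_by ids rest _ _ => (rest.length, ids.length)
end

def solution (user_id : List String) (banned_id : List String) : Int :=
  PySem.Set.len (processA (buildCountA user_id banned_id) [] PySem.Set.empty)

-- ===== PORT B =====
def matchesB (bid : String) (uid : String) : Bool :=
  PySem.Str.len bid == PySem.Str.len uid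
    && (bid.toList.zip uid.toList).all (fun p => p.1 == '*' || p.1 == p.2)

def solution_alt (user_id : List String) (banned_id : List String) : Int :=
  let slots := banned_id.map (fun bid =>
    ((PySem.List.enumerate user_id).filter (fun q => matchesB bid q.2)).map (fun q => q.1))
  let combos := slots.foldl (fun cs ids => cs.flatMap (fun c => ids.map (fun i => c ++ [i]))) [[]]
  let answer := (combos.filter
      (fun c => PySem.Set.len (PySem.Set.ofList c) == (c.length : Int))).foldl
      (fun s c => PySem.Set.add s
        (PySem.Str.join "" ((PySem.List.sorted c (fun x => x)).map PySem.Int.toStr)))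
      PySem.Set.empty
  PySem.Set.len answer

-- ===== PRECONDITION & SPEC =====
def Spec_solution (user_id : List String) (banned_id : List String) (out : Int) : Prop := out = solution_alt user_id banned_id
instance (user_id : List String) (banned_id : List String) (out : Int) : Decidable (Spec_solution user_id banned_id out) := by unfold Spec_solution; infer_instance

-- ===== CLAIM (what is proved, stated in full; the proofs are below) =====
def Claim_equal_solution : Prop := ∀ (user_id : List String) (banned_id : List String), Dom_solution user_id banned_id → Spec_solution user_id banned_id (solution user_id banned_id)

-- ===== LEMMAS AND PROOFS =====

-- the dedup key both programs use for a full assignment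
def keyStr (c : List Int) : String :=
  PySem.Str.join "" ((PySem.List.sorted c (fun x => x)).map PySem.Int.toStr)

-- all ways to pick one id from each row, in order
def picks : List (List Int) → List (List Int)
  | [] => [[]]
  | ids :: rest => ids.flatMap (fun i => (picks rest).map (fun c => i :: c))

-- A's pruning condition along a branch: each picked id avoids everything picked before it
def freshP (included : List Int) : List Int → Prop
  | [] => True
  | i :: c => i ∉ included ∧ freshP (included ++ [i]) c

theorem isSameA_eq_zip (bs us : List Char) :
    isSameA bs us = (bs.zip us).all (fun p => p.1 == '*' || p.1 == p.2) := by
  induction bs generalizing us with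
  | nil => simp [isSameA]
  | cons b bs ih =>
    cases us with
    | nil => simp [isSameA]
    | cons u us =>
      by_cases hb : b = '*'
      · simp [isSameA, hb, ih]
      · by_cases hu : b = u
        · simp [isSameA, hu, ih]
        · simp [isSameA, hb, hu]

theorem matchesB_eq (bid uid : String) :
    matchesB bid uid
      = (decide (PySem.Str.len bid = PySem.Str.len uid) && isSameA bid.toList uid.toList) := by
  by_cases h : bid.length = uid.length <;>
    simp [matchesB, isSameA_eq_zip, PySem.Str.len, h]

theorem inner_general (E : List (Int × String)) (bid : String) (count : List (List Int))
    (n : Nat) (hn : n < count.length) :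
    E.foldl
      (fun ct q =>
        if PySem.Str.len bid ≠ PySem.Str.len q.2 then ct
        else if isSameA bid.toList q.2.toList then
          PySem.List.pySetD ct (n : Int) (PySem.List.pyGetD ct (n : Int) [] ++ [q.1])
        else ct)
      count
    = count.set n (count.getD n [] ++ (E.filter (fun q => matchesB bid q.2)).map (fun q => q.1)) := by
  induction E generalizing count with
  | nil =>
    simp only [List.foldl_nil, List.filter_nil, List.map_nil, List.append_nil]
    rw [List.getD_eq_getElem count [] hn]
    exact (List.set_getElem_self hn).symm
  | cons q E ih =>
    rw [List.foldl_cons]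
    by_cases hlen : PySem.Str.len bid = PySem.Str.len q.2
    · have hlen' : bid.length = q.2.length := by simpa using hlen
      rw [if_neg (not_not_intro hlen)]
      by_cases hsame : isSameA bid.toList q.2.toList
      · rw [if_pos hsame]
        have hm : matchesB bid q.2 = true := by
          rw [matchesB_eq, hsame]; simp [hlen']
        rw [PySem.List.pySetD_natCast, PySem.List.pyGetD_natCast,
          List.getD_eq_getElem count [] hn]
        rw [ih (count.set n (count[n] ++ [q.1])) (by simpa using hn)]
        rw [List.getD_eq_getElem _ [] (by simpa using hn),
          List.getElem_set_self, List.set_set]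
        simp [hm, List.append_assoc]
      · rw [if_neg hsame]
        have hs' : isSameA bid.toList q.2.toList = false := eq_false_of_ne_true hsame
        have hm : matchesB bid q.2 = false := by
          rw [matchesB_eq, hs']; simp
        rw [ih count hn]
        simp [hm]
    · rw [if_pos hlen]
      have hm : matchesB bid q.2 = false := by
        rw [matchesB_eq]
        have hne : ¬ bid.length = q.2.length := fun h => hlen (by simp [PySem.Str.len, h])
        simp [hne]
      rw [ih count hn]
      simp [hm]

theorem take_set_succ (l : List (List Int)) (n : Nat) (a : List Int) (h : n < l.length) :
    (l.set n a).take (n + 1) = l.take n ++ [a] := by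
  apply List.ext_getElem
  · simp; omega
  · intro i h1 h2
    by_cases hi : i < n
    · rw [List.getElem_take, List.getElem_set_ne (by omega),
        List.getElem_append_left (by simp; omega), List.getElem_take]
    · have hin : i = n := by simp at h1; omega
      subst hin
      rw [List.getElem_take, List.getElem_set_self]
      rw [List.getElem_append_right (by simp)]
      simp

theorem outer_fold (user_id : List String) :
    ∀ (bs : List String) (s : Nat) (count : List (List Int)),
    s + bs.length = count.length →
    (∀ j (hj : j < count.length), s ≤ j → count[j] = []) →
    (PySem.List.enumerate bs (s : Int)).foldl
      (fun count p =>
        (PySem.List.enumerate user_id).foldl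
          (fun count q =>
            if PySem.Str.len p.2 ≠ PySem.Str.len q.2 then count
            else if isSameA p.2.toList q.2.toList then
              PySem.List.pySetD count p.1 (PySem.List.pyGetD count p.1 [] ++ [q.1])
            else count)
          count)
      count
    = count.take s ++ bs.map (fun bid =>
        ((PySem.List.enumerate user_id).filter (fun q => matchesB bid q.2)).map (fun q => q.1)) := by
  intro bs
  induction bs with
  | nil =>
    intro s count hlen _
    have h0 : PySem.List.enumerate ([] : List String) (s : Int) = [] := rfl
    rw [h0]
    simp [List.take_of_length_le (show count.length ≤ s by simp at hlen; omega)]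
  | cons b bs ih =>
    intro s count hlen hempty
    simp only [List.length_cons] at hlen
    have hs : s < count.length := by omega
    rw [PySem.List.enumerate_cons]
    simp only [List.foldl_cons]
    rw [inner_general (PySem.List.enumerate user_id) b count s hs]
    rw [List.getD_eq_getElem count [] hs, hempty s hs (le_refl s), List.nil_append]
    have hcast : (s : Int) + 1 = ((s + 1 : Nat) : Int) := by push_cast; ring
    rw [hcast]
    rw [ih (s + 1) _ (by simp; omega) ?hemp]
    case hemp =>
      intro j hj hji
      rw [List.getElem_set_ne (by omega)]
      exact hempty j (by simpa using hj) (by omega)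
    rw [take_set_succ count s _ hs]
    simp [List.append_assoc]


theorem buildCountA_eq (user_id banned_id : List String) :
    buildCountA user_id banned_id
      = banned_id.map (fun bid =>
          ((PySem.List.enumerate user_id).filter (fun q => matchesB bid q.2)).map (fun q => q.1)) := by
  have h := outer_fold user_id banned_id 0 (banned_id.map (fun _ => []))
    (by simp) (fun j hj _ => by simp)
  simpa [buildCountA] using h

theorem process_mem (rest : List (List Int)) (included : List Int)
    (answer : PySem.Set String) (s : String) :
    s ∈ processA rest included answer
      ↔ s ∈ answer ∨ ∃ c ∈ picks rest, freshP included c ∧ s = keyStr (included ++ c) := by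
  induction rest generalizing included answer with
  | nil =>
    simp only [processA]
    rw [PySem.Set.mem_add]
    simp [picks, keyStr, freshP]
  | cons ids rest ih =>
    simp only [processA]
    have loop : ∀ (ids₂ : List Int) (ans : PySem.Set String),
        s ∈ processLoopA ids₂ rest included ans
          ↔ s ∈ ans ∨ ∃ i ∈ ids₂, i ∉ included ∧
              ∃ c ∈ picks rest, freshP (included ++ [i]) c ∧ s = keyStr (included ++ i :: c) := by
      intro ids₂
      induction ids₂ with
      | nil => intro ans; simp [processLoopA]
      | cons id ids₂ ihl =>
        intro ans
        simp only [processLoopA]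
        rw [ihl]
        by_cases hid : included.contains id
        · have hmem : id ∈ included := by simpa using hid
          rw [if_pos hid]
          simp only [List.mem_cons]
          constructor
          · rintro (h | ⟨i, hi, rest'⟩)
            · exact Or.inl h
            · exact Or.inr ⟨i, Or.inr hi, rest'⟩
          · rintro (h | ⟨i, (rfl | hi), hnotin, rest'⟩)
            · exact Or.inl h
            · exact absurd hmem hnotin
            · exact Or.inr ⟨i, hi, hnotin, rest'⟩
        · have hmem : id ∉ included := by simpa using hid
          rw [if_neg hid]
          rw [ih (included ++ [id])]
          simp only [List.mem_cons]
          constructor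
          · rintro ((h | ⟨c, hc, hf, rfl⟩) | ⟨i, hi, hni, c, hc, hf, rfl⟩)
            · exact Or.inl h
            · exact Or.inr ⟨id, Or.inl rfl, hmem, c, hc, hf, by simp⟩
            · exact Or.inr ⟨i, Or.inr hi, hni, c, hc, hf, rfl⟩
          · rintro (h | ⟨i, (rfl | hi), hni, c, hc, hf, rfl⟩)
            · exact Or.inl (Or.inl h)
            · exact Or.inl (Or.inr ⟨c, hc, hf, by simp⟩)
            · exact Or.inr ⟨i, hi, hni, c, hc, hf, rfl⟩
    rw [loop]
    simp only [picks, List.mem_flatMap, List.mem_map]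
    constructor
    · rintro (h | ⟨i, hi, hni, c, hc, hf, rfl⟩)
      · exact Or.inl h
      · exact Or.inr ⟨i :: c, ⟨i, hi, c, hc, rfl⟩, ⟨hni, hf⟩, rfl⟩
    · rintro (h | ⟨c', ⟨i, hi, c, hc, rfl⟩, hf, rfl⟩)
      · exact Or.inl h
      · exact Or.inr ⟨i, hi, hf.1, c, hc, hf.2, rfl⟩

theorem process_nodup (rest : List (List Int)) (included : List Int)
    (answer : PySem.Set String) (h : answer.Nodup) :
    (processA rest included answer).Nodup := by
  induction rest generalizing included answer with
  | nil =>
    simp only [processA]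
    exact PySem.Set.nodup_add _ _ h
  | cons ids rest ih =>
    simp only [processA]
    have loop : ∀ (ids₂ : List Int) (ans : PySem.Set String), ans.Nodup →
        (processLoopA ids₂ rest included ans).Nodup := by
      intro ids₂
      induction ids₂ with
      | nil => intro ans hans; simpa only [processLoopA] using hans
      | cons id ids₂ ihl =>
        intro ans hans
        simp only [processLoopA]
        apply ihl
        split
        · exact hans
        · exact ih _ _ hans
    exact loop ids answer h

theorem freshP_iff (c : List Int) : ∀ (inc : List Int),
    freshP inc c ↔ c.Nodup ∧ ∀ i ∈ c, i ∉ inc := by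
  induction c with
  | nil => simp [freshP]
  | cons i c ih =>
    intro inc
    simp only [freshP, ih, List.nodup_cons, List.mem_append,
      List.mem_cons]
    constructor
    · rintro ⟨hi, hn, hf⟩
      refine ⟨⟨fun hic => (hf i hic (Or.inr (Or.inl rfl))).elim, hn⟩, ?_⟩
      rintro j (rfl | hj)
      · exact hi
      · exact fun hjinc => hf j hj (Or.inl hjinc)
    · rintro ⟨⟨hic, hn⟩, hf⟩
      refine ⟨hf i (Or.inl rfl), hn, ?_⟩
      intro j hj
      rintro (hjinc | rfl | h0)
      · exact hf j (Or.inr hj) hjinc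
      · exact hic hj
      · simp at h0

theorem combos_mem (slots : List (List Int)) : ∀ (acc : List (List Int)) (x : List Int),
    x ∈ slots.foldl (fun cs ids => cs.flatMap (fun c => ids.map (fun i => c ++ [i]))) acc
      ↔ ∃ c ∈ acc, ∃ t ∈ picks slots, x = c ++ t := by
  induction slots with
  | nil => intro acc x; simp [picks]
  | cons ids rest ih =>
    intro acc x
    rw [List.foldl_cons, ih]
    simp only [picks, List.mem_flatMap, List.mem_map]
    constructor
    · rintro ⟨c', ⟨c, hc, i, hi, rfl⟩, t, ht, rfl⟩
      exact ⟨c, hc, i :: t, ⟨i, hi, t, ht, rfl⟩, by simp⟩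
    · rintro ⟨c, hc, t', ⟨i, hi, t, ht, rfl⟩, rfl⟩
      exact ⟨c ++ [i], ⟨c, hc, i, hi, rfl⟩, t, ht, by simp⟩

theorem length_ofList_lt (xs : List Int) (h : ¬ xs.Nodup) :
    (PySem.Set.ofList xs).length < xs.length := by
  induction xs with
  | nil => simp at h
  | cons x xs ih =>
    rw [PySem.Set.ofList_cons]
    simp only [List.nodup_cons, not_and_or, not_not] at h
    by_cases hx : x ∈ xs
    · have hmem : x ∈ PySem.Set.ofList xs := (PySem.Set.mem_ofList xs x).2 hx
      have hlt : ((PySem.Set.ofList xs).discard x).length < (PySem.Set.ofList xs).length := by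
        apply List.length_filter_lt_length_iff_exists.2
        exact ⟨x, hmem, by simp⟩
      have := PySem.Set.length_ofList_le xs
      simp only [List.length_cons]
      omega
    · have hnd : ¬ xs.Nodup := by tauto
      have hlt := ih hnd
      have hle : ((PySem.Set.ofList xs).discard x).length ≤ (PySem.Set.ofList xs).length :=
        List.length_filter_le _ _
      simp only [List.length_cons]
      omega

theorem lenSet_iff (c : List Int) :
    (PySem.Set.len (PySem.Set.ofList c) == (c.length : Int)) = true ↔ c.Nodup := by
  simp only [PySem.Set.len, beq_iff_eq, Int.natCast_inj]
  constructor
  · intro h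
    by_contra hnd
    exact absurd h (Nat.ne_of_lt (length_ofList_lt c hnd))
  · intro h
    rw [PySem.Set.ofList_eq_self_of_nodup c h]

theorem nodup_foldl_add (l : List (List Int)) (s : PySem.Set String) (h : s.Nodup) :
    (l.foldl (fun s c => PySem.Set.add s (keyStr c)) s).Nodup := by
  induction l generalizing s with
  | nil => exact h
  | cons c l ih => exact ih _ (PySem.Set.nodup_add _ _ h)

-- ===== VERDICT (by name: the statement is the Claim_ definition above) =====
theorem solution_spec : Claim_equal_solution := by
  intro user_id banned_id _
  unfold Spec_solution
  show solution user_id banned_id = solution_alt user_id banned_id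
  simp only [solution, solution_alt]
  rw [buildCountA_eq]
  have hA : (processA
      (banned_id.map (fun bid =>
        ((PySem.List.enumerate user_id).filter (fun q => matchesB bid q.2)).map (fun q => q.1)))
      [] PySem.Set.empty).Nodup :=
    process_nodup _ _ _ List.nodup_nil
  have hB := nodup_foldl_add
    ((((banned_id.map (fun bid =>
        ((PySem.List.enumerate user_id).filter (fun q => matchesB bid q.2)).map (fun q => q.1))).foldl
        (fun cs ids => cs.flatMap (fun c => ids.map (fun i => c ++ [i]))) [[]]).filter
        (fun c => PySem.Set.len (PySem.Set.ofList c) == (c.length : Int))))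
    PySem.Set.empty List.nodup_nil
  have hmem : ∀ t, t ∈ (processA
      (banned_id.map (fun bid =>
        ((PySem.List.enumerate user_id).filter (fun q => matchesB bid q.2)).map (fun q => q.1)))
      [] PySem.Set.empty)
      ↔ t ∈ ((((banned_id.map (fun bid =>
        ((PySem.List.enumerate user_id).filter (fun q => matchesB bid q.2)).map (fun q => q.1))).foldl
        (fun cs ids => cs.flatMap (fun c => ids.map (fun i => c ++ [i]))) [[]]).filter
        (fun c => PySem.Set.len (PySem.Set.ofList c) == (c.length : Int))).foldl
        (fun s c => PySem.Set.add s (keyStr c)) PySem.Set.empty) := by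
    intro t
    rw [process_mem, PySem.Set.mem_foldl_add]
    simp only [List.mem_filter, combos_mem, lenSet_iff, freshP_iff, List.nil_append,
      PySem.Set.empty, List.not_mem_nil, not_false_iff, imp_true_iff, and_true,
      List.mem_singleton, false_or]
    constructor
    · rintro ⟨c, hc, hnd, rfl⟩
      exact ⟨c, ⟨⟨[], rfl, c, hc, by simp⟩, hnd⟩, rfl⟩
    · rintro ⟨c, ⟨⟨c1, rfl, u, hu, rfl⟩, hnd⟩, rfl⟩
      exact ⟨_, hu, by simpa using hnd, by simp⟩
  have hperm := (List.perm_ext_iff_of_nodup hA hB).2 hmem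
  simp only [PySem.Set.len]
  exact_mod_cast congrArg Nat.cast hperm.length_eq
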